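-- pv_equiv track=rewrite | github.com/ChrisRPL/ml-junior | backend/workflow_state.py | _verifier_summary_status
-- ===== SOURCE A (Python) =====
-- from typing import Any
--
-- def _verifier_summary_status(verifier_verdicts: list[dict[str, Any]]) -> str:
--     statuses = {str(verdict.get("verdict") or "") for verdict in verifier_verdicts}
--     if "failed" in statuses:
--         return "failed"
--     if "inconclusive" in statuses:
--         return "inconclusive"
--     if "passed" in statuses:
--         return "passed"
--     return "unknown"
-- ===== SOURCE B (Python) =====
-- _LABELS = ["failed", "inconclusive", "passed"]
-- _PRIORITY = {"failed": 0, "inconclusive": 1, "passed": 2}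
--
-- def _verifier_summary_status(verifier_verdicts):
--     best = len(_LABELS)
--     for verdict in verifier_verdicts:
--         status = str(verdict.get("verdict") or "")
--         best = min(best, _PRIORITY.get(status, len(_LABELS)))
--     return _LABELS[best] if best < len(_LABELS) else "unknown"
-- ===== Notes on version B (the rewrite author's own statement) =====
-- stated objective: simpler
-- what changed: Replaces the set comprehension plus ordered membership chain with a single fold keeping the minimum priority rank seen, mapped back to its label at the end.
import Mathlib
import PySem

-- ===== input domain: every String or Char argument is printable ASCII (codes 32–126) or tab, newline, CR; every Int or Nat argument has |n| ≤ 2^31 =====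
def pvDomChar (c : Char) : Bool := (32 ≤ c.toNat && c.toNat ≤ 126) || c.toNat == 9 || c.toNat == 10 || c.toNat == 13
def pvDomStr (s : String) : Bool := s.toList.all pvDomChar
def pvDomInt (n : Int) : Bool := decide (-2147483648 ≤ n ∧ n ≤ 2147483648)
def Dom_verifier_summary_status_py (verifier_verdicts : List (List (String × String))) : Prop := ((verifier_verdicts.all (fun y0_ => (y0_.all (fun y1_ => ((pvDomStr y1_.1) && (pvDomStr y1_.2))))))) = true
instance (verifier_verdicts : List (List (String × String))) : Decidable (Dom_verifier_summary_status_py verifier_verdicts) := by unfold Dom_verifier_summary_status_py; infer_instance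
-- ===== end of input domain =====

-- B replaces A's set-comprehension + ordered membership chain by a single fold keeping
-- the minimum priority rank, mapped back to its label (objective: simpler).


-- shared helper: Python's  str(verdict.get("verdict") or "")  (values are strings; str is identity,
-- 'or ""' maps a missing key (None) to "" and keeps "" as "")
def pvStatusOf (verdict : List (String × String)) : String :=
  ((PySem.Dict.mk verdict).get? "verdict").getD ""

-- ===== PORT A =====
def verifier_summary_status_py (verifier_verdicts : List (List (String × String))) : String :=
  let statuses : PySem.Set String := PySem.Set.ofList (verifier_verdicts.map pvStatusOf)
  if PySem.Set.contains statuses "failed" then "failed"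
  else if PySem.Set.contains statuses "inconclusive" then "inconclusive"
  else if PySem.Set.contains statuses "passed" then "passed"
  else "unknown"

-- ===== PORT B =====
-- _PRIORITY.get(status, 3): lookup in the literal dict, as an if-chain
def pvRank (s : String) : Nat :=
  if s = "failed" then 0 else if s = "inconclusive" then 1 else if s = "passed" then 2 else 3

def verifier_summary_status_py_alt (verifier_verdicts : List (List (String × String))) : String :=
  let best := verifier_verdicts.foldl (fun b d => min b (pvRank (pvStatusOf d))) 3
  if best < 3 then ["failed", "inconclusive", "passed"].getD best "unknown" else "unknown"

-- ===== PRECONDITION & SPEC =====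
def Spec_verifier_summary_status_py (verifier_verdicts : List (List (String × String))) (out : String) : Prop := out = verifier_summary_status_py_alt verifier_verdicts
instance (verifier_verdicts : List (List (String × String))) (out : String) : Decidable (Spec_verifier_summary_status_py verifier_verdicts out) := by unfold Spec_verifier_summary_status_py; infer_instance

-- ===== CLAIM (what is proved, stated in full; the proofs are below) =====
def Claim_equal_verifier_summary_status_py : Prop := ∀ (verifier_verdicts : List (List (String × String))), Dom_verifier_summary_status_py verifier_verdicts → Spec_verifier_summary_status_py verifier_verdicts (verifier_summary_status_py verifier_verdicts)

-- ===== LEMMAS AND PROOFS =====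

-- B's running minimum, characterised: it is ≤ k iff the seed is or some element's rank is
theorem foldl_min_le (l : List String) (b k : Nat) :
    l.foldl (fun a s => min a (pvRank s)) b ≤ k ↔ b ≤ k ∨ ∃ s ∈ l, pvRank s ≤ k := by
  induction l generalizing b with
  | nil => simp
  | cons x xs ih =>
    simp only [List.foldl_cons, ih, min_le_iff, List.mem_cons]
    constructor
    · rintro (h | ⟨s, hs, hr⟩)
      · rcases h with h | h
        · exact Or.inl h
        · exact Or.inr ⟨x, Or.inl rfl, h⟩
      · exact Or.inr ⟨s, Or.inr hs, hr⟩
    · rintro (h | ⟨s, hs, hr⟩)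
      · exact Or.inl (Or.inl h)
      · rcases hs with rfl | hs
        · exact Or.inl (Or.inr hr)
        · exact Or.inr ⟨s, hs, hr⟩

theorem pvRank_le_zero (s : String) : pvRank s ≤ 0 ↔ s = "failed" := by
  unfold pvRank; split_ifs with h1 h2 h3 <;> simp_all
theorem pvRank_le_one (s : String) : pvRank s ≤ 1 ↔ s = "failed" ∨ s = "inconclusive" := by
  unfold pvRank; split_ifs with h1 h2 h3 <;> simp_all
theorem pvRank_le_two (s : String) :
    pvRank s ≤ 2 ↔ s = "failed" ∨ s = "inconclusive" ∨ s = "passed" := by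
  unfold pvRank; split_ifs with h1 h2 h3 <;> simp_all

-- ===== VERDICT (by name: the statement is the Claim_ definition above) =====
theorem verifier_summary_status_py_spec : Claim_equal_verifier_summary_status_py := by
  intro vs _
  unfold Spec_verifier_summary_status_py verifier_summary_status_py verifier_summary_status_py_alt
  have hfm : vs.foldl (fun b d => min b (pvRank (pvStatusOf d))) 3
      = (vs.map pvStatusOf).foldl (fun (a : Nat) s => min a (pvRank s)) 3 :=
    (List.foldl_map (f := pvStatusOf) (g := fun (a : Nat) s => min a (pvRank s))).symm
  rw [hfm]
  set ks := vs.map pvStatusOf with hks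
  set best := ks.foldl (fun (a : Nat) s => min a (pvRank s)) 3 with hbest
  have hle : ∀ k, k < 3 → (best ≤ k ↔ ∃ s ∈ ks, pvRank s ≤ k) := by
    intro k hk
    rw [hbest, foldl_min_le]
    constructor
    · rintro (h | h)
      · omega
      · exact h
    · intro h; exact Or.inr h
  have hmem : ∀ x : String, PySem.Set.contains (PySem.Set.ofList ks) x = true ↔ x ∈ ks := by
    intro x; rw [PySem.Set.contains_iff, PySem.Set.mem_ofList]
  by_cases hf : "failed" ∈ ks
  · have hb : best = 0 := by
      have := (hle 0 (by omega)).mpr ⟨"failed", hf, by rw [pvRank_le_zero]⟩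
      omega
    rw [if_pos ((hmem "failed").mpr hf), hb]
    simp
  · rw [if_neg (by simp [hf])]
    have h0 : ¬ best ≤ 0 := by
      intro h
      obtain ⟨s, hs, hr⟩ := (hle 0 (by omega)).mp h
      rw [pvRank_le_zero] at hr; exact hf (hr ▸ hs)
    by_cases hi : "inconclusive" ∈ ks
    · have hb : best = 1 := by
        have := (hle 1 (by omega)).mpr ⟨"inconclusive", hi, by rw [pvRank_le_one]; right; rfl⟩
        omega
      rw [if_pos ((hmem "inconclusive").mpr hi), hb]
      simp
    · rw [if_neg (by simp [hi])]
      have h1 : ¬ best ≤ 1 := by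
        intro h
        obtain ⟨s, hs, hr⟩ := (hle 1 (by omega)).mp h
        rw [pvRank_le_one] at hr
        rcases hr with rfl | rfl
        · exact hf hs
        · exact hi hs
      by_cases hp : "passed" ∈ ks
      · have hb : best = 2 := by
          have := (hle 2 (by omega)).mpr ⟨"passed", hp, by rw [pvRank_le_two]; right; right; rfl⟩
          omega
        rw [if_pos ((hmem "passed").mpr hp), hb]
        simp
      · rw [if_neg (by simp [hp])]
        have h2 : ¬ best ≤ 2 := by
          intro h
          obtain ⟨s, hs, hr⟩ := (hle 2 (by omega)).mp h
          rw [pvRank_le_two] at hr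
          rcases hr with rfl | rfl | rfl
          · exact hf hs
          · exact hi hs
          · exact hp hs
        rw [if_neg (by omega)]
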